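-- pv_equiv track=rewrite | github.com/nobleblackk/InterviewBit | Arrays/MAXSPPROD.py | maxSpecialProduct
-- ===== SOURCE A (Python) =====
-- def maxSpecialProduct(A):
--     arr=[]
--     left=0
--     right=0
--     for i in range(len(A)):
--
--         for j in range(i-1,-1,-1):
--             if A[j]>A[i]:
--                 left=A[j]
--         for j in range(i+1,len(A),1):
--             if A[j]>A[i]:
--                 right=A[j]
--         arr.append((left*right))
--         left,right=0,0
--     return (max(arr)%1000000007)
-- ===== SOURCE B (Python) =====
-- def maxSpecialProduct(A):
--     # One pass per direction maintaining the (strictly increasing) list of running-maximum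
--     # "record" values; the farthest greater element on a side is the first record exceeding A[i].
--     left = []
--     recs = []
--     for x in A:
--         left.append(next((v for v in recs if v > x), 0))
--         if not recs or x > recs[-1]:
--             recs.append(x)
--     right = []
--     recs = []
--     for x in reversed(A):
--         right.append(next((v for v in recs if v > x), 0))
--         if not recs or x > recs[-1]:
--             recs.append(x)
--     right.reverse()
--     return max(l * r for l, r in zip(left, right)) % 1000000007
-- ===== Notes on version B (the rewrite author's own statement) =====
-- stated objective: faster
-- what changed: Replaces A's full backward/forward rescan of the array for every index by two single sweeps that maintain the strictly increasing stack of running-maximum record values, so each index only looks up the first record exceeding it in that (typically tiny) stack.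
-- outside the precondition, e.g. on maxSpecialProduct([]): A raises ValueError, B raises ValueError
import Mathlib
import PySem

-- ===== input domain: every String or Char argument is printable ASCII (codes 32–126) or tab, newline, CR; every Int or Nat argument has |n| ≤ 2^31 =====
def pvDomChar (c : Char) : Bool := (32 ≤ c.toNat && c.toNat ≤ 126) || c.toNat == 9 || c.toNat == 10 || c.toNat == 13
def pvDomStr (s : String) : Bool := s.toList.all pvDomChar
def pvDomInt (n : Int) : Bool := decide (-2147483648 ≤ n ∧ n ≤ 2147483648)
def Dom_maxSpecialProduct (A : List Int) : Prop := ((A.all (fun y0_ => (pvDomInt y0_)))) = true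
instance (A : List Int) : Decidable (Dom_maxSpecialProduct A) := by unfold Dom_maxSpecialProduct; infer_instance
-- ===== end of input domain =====

-- B replaces A's full backward/forward rescans per index by two sweeps that keep the running-maximum
-- record stack, looking up the first record exceeding the current value (objective: faster in practice).

-- ===== PORT A =====
-- A resets left/right to 0 at the end of every iteration, so each iteration starts both at 0.
def maxSpecialProduct (A : List Int) : Int :=
  let n : Int := (A.length : Int)
  let arr : List Int := (PySem.List.pyRange 0 n 1).foldl (fun arr i =>
    let ai := PySem.List.pyGetD A i 0
    let left := (PySem.List.pyRange (i-1) (-1) (-1)).foldl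
      (fun left j => if ai < PySem.List.pyGetD A j 0 then PySem.List.pyGetD A j 0 else left) 0
    let right := (PySem.List.pyRange (i+1) n 1).foldl
      (fun right j => if ai < PySem.List.pyGetD A j 0 then PySem.List.pyGetD A j 0 else right) 0
    arr ++ [left * right]) []
  match PySem.List.max? arr (fun x => x) with
  | some m => PySem.Int.mod m 1000000007
  | none => 0          -- unreached under Pre_ (Python raises ValueError on max of [])

-- ===== PORT B =====
-- next((v for v in recs if v > x), 0)
def pvFirstGT (recs : List Int) (x : Int) : Int :=
  (recs.find? (fun v => x < v)).getD 0
-- if not recs or x > recs[-1]: recs.append(x)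
def pvRecAdd (recs : List Int) (x : Int) : List Int :=
  match recs.getLast? with
  | none => recs ++ [x]
  | some m => if m < x then recs ++ [x] else recs
-- one sweep: builds the out list and the record stack
def pvPass (xs : List Int) : List Int × List Int :=
  xs.foldl (fun s x => (s.1 ++ [pvFirstGT s.2 x], pvRecAdd s.2 x)) ([], [])

def maxSpecialProduct_alt (A : List Int) : Int :=
  let left := (pvPass A).1
  let right := ((pvPass A.reverse).1).reverse
  let prods := (left.zip right).map (fun p => p.1 * p.2)
  match PySem.List.max? prods (fun x => x) with
  | some m => PySem.Int.mod m 1000000007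
  | none => 0          -- unreached under Pre_ (Python raises ValueError on max of empty generator)

-- ===== PRECONDITION & SPEC =====
-- Python A raises ValueError (max of an empty list) on A = []; that is the only exclusion.
def Pre_maxSpecialProduct (A : List Int) : Prop := A ≠ []
instance (A : List Int) : Decidable (Pre_maxSpecialProduct A) := by unfold Pre_maxSpecialProduct; infer_instance
def pvWitness_maxSpecialProduct : List Int := [1, 3, 2]

def Spec_maxSpecialProduct (A : List Int) (out : Int) : Prop := out = maxSpecialProduct_alt A
instance (A : List Int) (out : Int) : Decidable (Spec_maxSpecialProduct A out) := by unfold Spec_maxSpecialProduct; infer_instance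

-- ===== CLAIM (what is proved, stated in full; the proofs are below) =====
def Claim_equal_maxSpecialProduct : Prop := ∀ (A : List Int), Dom_maxSpecialProduct A → Pre_maxSpecialProduct A → Spec_maxSpecialProduct A (maxSpecialProduct A)

-- ===== LEMMAS AND PROOFS =====

-- "first element > x" characterizations
theorem foldr_firstGT (x : Int) (xs : List Int) (b : Int) :
    List.foldr (fun v acc => if x < v then v else acc) b xs
      = (xs.find? (fun v => x < v)).getD b := by
  induction xs with
  | nil => rfl
  | cons h t ih => by_cases hx : x < h <;> simp [List.find?, hx, ih]

theorem foldl_lastGT (x : Int) (xs : List Int) :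
    List.foldl (fun acc v => if x < v then v else acc) 0 xs
      = ((xs.reverse.find? (fun v => x < v)).getD 0) := by
  rw [← foldr_firstGT, ← List.foldl_reverse]
  simp

-- the record-stack invariant
def pvRecsOf (xs : List Int) : List Int := xs.foldl pvRecAdd []

theorem pvRecs_inv (xs : List Int) :
    (∀ x : Int, (pvRecsOf xs).find? (fun v => x < v) = xs.find? (fun v => x < v))
    ∧ (pvRecsOf xs = [] ↔ xs = [])
    ∧ (∀ m, (pvRecsOf xs).getLast? = some m → ∀ v ∈ xs, v ≤ m) := by
  induction xs using List.reverseRecOn with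
  | nil => simp [pvRecsOf]
  | append_singleton xs a ih =>
    obtain ⟨ihF, ihE, ihM⟩ := ih
    have hrec : pvRecsOf (xs ++ [a]) = pvRecAdd (pvRecsOf xs) a := by
      simp [pvRecsOf]
    rcases hL : (pvRecsOf xs).getLast? with _ | m
    · -- recs empty, hence xs = []
      have hnil : pvRecsOf xs = [] := by
        cases h : pvRecsOf xs with
        | nil => rfl
        | cons y ys => rw [h] at hL; simp [List.getLast?] at hL
      have hxs : xs = [] := ihE.mp hnil
      subst hxs
      simp [pvRecAdd, pvRecsOf, List.getLast?]
    · by_cases hma : m < a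
      · -- append new record
        have h1 : pvRecsOf (xs ++ [a]) = pvRecsOf xs ++ [a] := by
          simp [hrec, pvRecAdd, hL, hma]
        refine ⟨fun x => ?_, ?_, ?_⟩
        · rw [h1, List.find?_append, List.find?_append, ihF]
        · simp [h1]
        · intro m' hm' v hv
          rw [h1] at hm'
          simp [List.getLast?_append] at hm'
          subst hm'
          rcases List.mem_append.mp hv with hv | hv
          · exact le_of_lt (lt_of_le_of_lt (ihM m hL v hv) hma)
          · simp at hv; omega
      · -- a ≤ m : stack unchanged
        have h1 : pvRecsOf (xs ++ [a]) = pvRecsOf xs := by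
          simp [hrec, pvRecAdd, hL, hma]
        refine ⟨fun x => ?_, ?_, ?_⟩
        · rw [h1, ihF, List.find?_append]
          by_cases hxa : x < a
          · -- some element of xs (namely the max m) satisfies the predicate
            have hm_mem : m ∈ pvRecsOf xs := List.mem_of_getLast? hL
            have : (pvRecsOf xs).find? (fun v => x < v) ≠ none := by
              intro hnone
              have := List.find?_eq_none.mp hnone m hm_mem
              simp at this
              omega
            rw [ihF] at this
            rcases h : xs.find? (fun v => x < v) with _ | w
            · exact absurd h this
            · simp
          · simp [List.find?, hxa]
        · constructor
          · intro h
            rw [h1] at h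
            have hx : xs = [] := ihE.mp h
            rw [hx] at hL
            exact absurd hL (by simp [pvRecsOf])
          · intro h; simp at h
        · intro m' hm' v hv
          rw [h1] at hm'
          rw [hL] at hm'
          injection hm' with hm'
          subst hm'
          rcases List.mem_append.mp hv with hv | hv
          · exact ihM m hL v hv
          · simp at hv; omega

-- closed form of pvPass
theorem pvPass_snd (xs : List Int) : (pvPass xs).2 = pvRecsOf xs := by
  induction xs using List.reverseRecOn with
  | nil => rfl
  | append_singleton xs a ih => simp [pvPass, pvRecsOf] at *; simp [ih]

theorem pvPass_fst (xs : List Int) :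
    (pvPass xs).1 = (List.range xs.length).map
      (fun k => ((xs.take k).find? (fun v => xs.getD k 0 < v)).getD 0) := by
  induction xs using List.reverseRecOn with
  | nil => rfl
  | append_singleton xs a ih =>
    have hstep : (pvPass (xs ++ [a])).1 = (pvPass xs).1 ++ [pvFirstGT (pvRecsOf xs) a] := by
      have h2 := pvPass_snd xs
      simp [pvPass] at *
      simp [h2]
    rw [hstep, ih]
    rw [List.length_append, List.length_singleton, List.range_succ, List.map_append]
    congr 1
    · apply List.map_congr_left
      intro k hk
      simp at hk
      have ht : (xs ++ [a]).take k = xs.take k := List.take_append_of_le_length (le_of_lt hk)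
      have hg : (xs ++ [a]).getD k 0 = xs.getD k 0 := by
        simp [List.getD, List.getElem?_append_left hk]
      rw [ht, hg]
    · simp only [List.map_cons, List.map_nil]
      have hga : (xs ++ [a]).getD xs.length 0 = a := by
        simp [List.getD]
      have hta : (xs ++ [a]).take xs.length = xs := by
        rw [List.take_append_of_le_length le_rfl, List.take_length]
      rw [hga, hta, pvFirstGT, (pvRecs_inv xs).1 a]

-- A-side inner loops in find? form
theorem foldr_range_take (A : List Int) (x : Int) :
    ∀ (m : Nat), m ≤ A.length → ∀ b : Int,
    List.foldr (fun (j : Nat) acc => if x < PySem.List.pyGetD A (j : Int) 0 then PySem.List.pyGetD A (j : Int) 0 else acc) b (List.range m)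
      = List.foldr (fun v acc => if x < v then v else acc) b (A.take m) := by
  intro m
  induction m with
  | zero => intro _ b; rfl
  | succ n ihn =>
    intro hm b
    have hn : n < A.length := by omega
    have hA : A[n]? = some A[n] := List.getElem?_eq_getElem hn
    rw [List.range_succ, List.foldr_append, List.take_add_one, hA]
    simp only [Option.toList, List.foldr_append, List.foldr_cons, List.foldr_nil]
    rw [ihn (by omega)]
    have hg : PySem.List.pyGetD A ((n : Nat) : Int) 0 = A[n] := by
      rw [PySem.List.pyGetD_natCast, List.getD_eq_getElem _ _ hn]
    rw [hg]

theorem leftA_eq (A : List Int) (k : Nat) (hk : k < A.length) :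
    (PySem.List.pyRange ((k : Int) - 1) (-1) (-1)).foldl
      (fun left j => if A.getD k 0 < PySem.List.pyGetD A j 0 then PySem.List.pyGetD A j 0 else left) 0
    = ((A.take k).find? (fun v => A.getD k 0 < v)).getD 0 := by
  rw [PySem.List.pyRange_neg_one_eq_reverse]
  have h1 : ((-1 : Int) + 1) = 0 := by ring
  have h2 : ((k : Int) - 1 + 1) = (k : Int) := by ring
  rw [h1, h2, List.foldl_reverse]
  rw [PySem.List.pyRange_zero_nat k, List.foldr_map,
     foldr_range_take A (A.getD k 0) k (le_of_lt hk) 0, foldr_firstGT]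

theorem rightA_eq (A : List Int) (k : Nat) (_hk : k < A.length) :
    (PySem.List.pyRange ((k : Int) + 1) (A.length : Int) 1).foldl
      (fun right j => if A.getD k 0 < PySem.List.pyGetD A j 0 then PySem.List.pyGetD A j 0 else right) 0
    = (((A.drop (k+1)).reverse).find? (fun v => A.getD k 0 < v)).getD 0 := by
  have h := PySem.List.foldl_pyRange_pyGetD (xs := A) (a := (k : Int) + 1) (d := 0)
      (f := fun acc v => if A.getD k 0 < v then v else acc) (init := (0 : Int)) (by positivity)
  simp only [PySem.List.len_eq] at h ⊢
  rw [h]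
  have : ((k : Int) + 1).toNat = k + 1 := by omega
  rw [this, foldl_lastGT]

-- arr = elementwise products
theorem arr_eq (A : List Int) :
    (PySem.List.pyRange 0 (A.length : Int) 1).foldl (fun arr i =>
      let ai := PySem.List.pyGetD A i 0
      let left := (PySem.List.pyRange (i-1) (-1) (-1)).foldl
        (fun left j => if ai < PySem.List.pyGetD A j 0 then PySem.List.pyGetD A j 0 else left) 0
      let right := (PySem.List.pyRange (i+1) (A.length : Int) 1).foldl
        (fun right j => if ai < PySem.List.pyGetD A j 0 then PySem.List.pyGetD A j 0 else right) 0
      arr ++ [left * right]) []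
    = (List.range A.length).map (fun k =>
        (((A.take k).find? (fun v => A.getD k 0 < v)).getD 0)
        * ((((A.drop (k+1)).reverse).find? (fun v => A.getD k 0 < v)).getD 0)) := by
  rw [PySem.List.foldl_append_singleton_eq_map]
  rw [PySem.List.pyRange_zero_nat A.length, List.map_map, List.nil_append]
  refine List.map_congr_left fun k hk => ?_
  simp only [Function.comp_apply]
  have hk' : k < A.length := List.mem_range.mp hk
  have hget : PySem.List.pyGetD A (k : Int) 0 = A.getD k 0 := by
    simp [PySem.List.pyGetD_natCast]
  rw [hget, leftA_eq A k hk', rightA_eq A k hk']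

-- B-side right list
theorem map_range_reverse {α : Type} (f : Nat → α) (n : Nat) :
    ((List.range n).map f).reverse = (List.range n).map (fun k => f (n - 1 - k)) := by
  apply List.ext_getElem
  · simp
  · intro k h1 h2
    simp only [List.length_map, List.length_range] at h1 h2
    simp only [List.getElem_reverse, List.getElem_map, List.getElem_range, List.length_map,
      List.length_range]

theorem rightB_eq (A : List Int) :
    ((pvPass A.reverse).1).reverse
      = (List.range A.length).map (fun k =>
          (((A.drop (k+1)).reverse).find? (fun v => A.getD k 0 < v)).getD 0) := by
  rw [pvPass_fst, List.length_reverse, map_range_reverse]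
  apply List.map_congr_left
  intro k hk
  have hk' : k < A.length := List.mem_range.mp hk
  have h1 : A.reverse.take (A.length - 1 - k) = (A.drop (k+1)).reverse := by
    have hidx : A.length - (A.length - 1 - k) = k + 1 := by omega
    rw [List.take_reverse, hidx]
  have h2 : A.reverse.getD (A.length - 1 - k) 0 = A.getD k 0 := by
    have hlt : A.length - 1 - k < A.length := by omega
    rw [List.getD_eq_getElem _ _ (by simpa using hlt), List.getD_eq_getElem _ _ hk']
    rw [List.getElem_reverse]
    congr 1
    omega
  rw [h1, h2]

-- ===== VERDICT (by name: the statement is the Claim_ definition above) =====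
theorem maxSpecialProduct_spec : Claim_equal_maxSpecialProduct := by
  intro A _ _
  unfold Spec_maxSpecialProduct
  simp only [maxSpecialProduct, maxSpecialProduct_alt]
  rw [arr_eq, pvPass_fst, rightB_eq]
  rw [List.zip_map']
  simp only [List.map_map, Function.comp_def]
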